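-- pv_equiv track=rewrite | github.com/claycampbell/InvestBrain | services/one_pager_service.py | _determine_validation_frequency
-- ===== SOURCE A (Python) =====
-- from typing import Dict, List, Any, Optional
--
-- def _determine_validation_frequency(validation_metrics: List[Dict]) -> str:
--     """Determine optimal validation frequency based on metrics"""
--     frequencies = [m.get('frequency', 'Monthly') for m in validation_metrics]
--     if 'Daily' in frequencies:
--         return 'Daily'
--     elif 'Weekly' in frequencies:
--         return 'Weekly'
--     elif 'Monthly' in frequencies:
--         return 'Monthly'
--     else:
--         return 'Quarterly'
-- ===== SOURCE B (Python) =====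
-- def _determine_validation_frequency(validation_metrics):
--     """Single reducing pass over a priority table instead of four membership scans."""
--     priority = {'Daily': 1, 'Weekly': 2, 'Monthly': 3}
--     labels = {1: 'Daily', 2: 'Weekly', 3: 'Monthly', 4: 'Quarterly'}
--     best = 4
--     for m in validation_metrics:
--         best = min(best, priority.get(m.get('frequency', 'Monthly'), 4))
--     return labels[best]
-- ===== Notes on version B (the rewrite author's own statement) =====
-- stated objective: alternative
-- what changed: Replaces the prebuilt frequency list plus four sequential membership scans with a single fold that minimises a numeric priority rank and maps it back to its label.
import Mathlib
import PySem

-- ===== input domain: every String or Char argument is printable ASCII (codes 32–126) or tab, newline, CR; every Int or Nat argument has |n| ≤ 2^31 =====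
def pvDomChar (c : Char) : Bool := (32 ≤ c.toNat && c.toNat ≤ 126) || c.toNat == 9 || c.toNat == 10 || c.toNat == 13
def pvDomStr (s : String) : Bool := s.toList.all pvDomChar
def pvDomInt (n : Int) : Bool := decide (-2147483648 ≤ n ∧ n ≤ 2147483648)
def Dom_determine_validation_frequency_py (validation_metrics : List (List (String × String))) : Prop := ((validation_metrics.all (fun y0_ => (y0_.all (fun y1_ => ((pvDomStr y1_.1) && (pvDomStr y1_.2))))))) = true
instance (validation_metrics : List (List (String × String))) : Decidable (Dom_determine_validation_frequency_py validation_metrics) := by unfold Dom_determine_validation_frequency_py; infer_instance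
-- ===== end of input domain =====

-- B replaces A's prebuilt frequency list and four membership scans with one fold minimising a priority rank (objective: alternative decomposition).

-- ===== PORT A =====
-- m.get('frequency', 'Monthly')
def pvGetFreq (m : List (String × String)) : String :=
  (PySem.Dict.mk m).getD "frequency" "Monthly"

def determine_validation_frequency_py (validation_metrics : List (List (String × String))) : String :=
  let frequencies := validation_metrics.map pvGetFreq
  if frequencies.contains "Daily" then "Daily"
  else if frequencies.contains "Weekly" then "Weekly"
  else if frequencies.contains "Monthly" then "Monthly"
  else "Quarterly"

-- ===== PORT B =====
-- priority.get(s, 4)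
def pvRankOf (s : String) : Int :=
  if s = "Daily" then 1 else if s = "Weekly" then 2 else if s = "Monthly" then 3 else 4

-- labels[r]
def pvLabelOf (r : Int) : String :=
  if r = 1 then "Daily" else if r = 2 then "Weekly" else if r = 3 then "Monthly" else "Quarterly"

def determine_validation_frequency_py_alt (validation_metrics : List (List (String × String))) : String :=
  pvLabelOf (validation_metrics.foldl (fun best m => min best (pvRankOf (pvGetFreq m))) 4)

-- ===== PRECONDITION & SPEC =====
def Spec_determine_validation_frequency_py (validation_metrics : List (List (String × String))) (out : String) : Prop := out = determine_validation_frequency_py_alt validation_metrics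
instance (validation_metrics : List (List (String × String))) (out : String) : Decidable (Spec_determine_validation_frequency_py validation_metrics out) := by unfold Spec_determine_validation_frequency_py; infer_instance

-- ===== CLAIM (what is proved, stated in full; the proofs are below) =====
def Claim_equal_determine_validation_frequency_py : Prop := ∀ (validation_metrics : List (List (String × String))), Dom_determine_validation_frequency_py validation_metrics → Spec_determine_validation_frequency_py validation_metrics (determine_validation_frequency_py validation_metrics)

-- ===== LEMMAS AND PROOFS =====

-- minimum rank of a list of frequency strings (B's fold restricted to the string list)
def pvMinRank (fs : List String) : Int :=
  fs.foldl (fun best f => min best (pvRankOf f)) 4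

theorem pvRankOf_bounds (s : String) : 1 ≤ pvRankOf s ∧ pvRankOf s ≤ 4 := by
  unfold pvRankOf; split_ifs <;> omega

theorem pvFoldl_min_acc (fs : List String) (a : Int) (ha : a ≤ 4) :
    fs.foldl (fun best f => min best (pvRankOf f)) a = min a (pvMinRank fs) := by
  induction fs generalizing a with
  | nil => simp [pvMinRank]; omega
  | cons x xs ih =>
      have hx := pvRankOf_bounds x
      simp only [pvMinRank, List.foldl_cons]
      rw [ih _ (by omega), ih (min 4 (pvRankOf x)) (by omega)]
      omega

theorem pvMinRank_cons (x : String) (xs : List String) :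
    pvMinRank (x :: xs) = min (pvRankOf x) (pvMinRank xs) := by
  have hx := pvRankOf_bounds x
  simp only [pvMinRank, List.foldl_cons]
  rw [pvFoldl_min_acc _ _ (by omega)]
  simp only [pvMinRank]
  omega

theorem pvMinRank_key (fs : List String) :
    1 ≤ pvMinRank fs ∧ pvMinRank fs ≤ 4 ∧
    (pvMinRank fs = 1 ↔ "Daily" ∈ fs) ∧
    (pvMinRank fs = 2 ↔ "Daily" ∉ fs ∧ "Weekly" ∈ fs) ∧
    (pvMinRank fs = 3 ↔ "Daily" ∉ fs ∧ "Weekly" ∉ fs ∧ "Monthly" ∈ fs) := by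
  induction fs with
  | nil => simp [pvMinRank]
  | cons x xs ih =>
      obtain ⟨h1, h4, hd, hw, hm⟩ := ih
      rw [pvMinRank_cons]
      have hx := pvRankOf_bounds x
      by_cases d : "Daily" ∈ xs <;> by_cases w : "Weekly" ∈ xs <;> by_cases m : "Monthly" ∈ xs <;>
        by_cases cx1 : x = "Daily" <;> by_cases cx2 : x = "Weekly" <;> by_cases cx3 : x = "Monthly" <;>
          simp_all [pvRankOf] <;> first | omega | exact fun h => ‹¬_› h.symm | (refine ⟨fun h => cx1 h.symm, fun _ h => cx2 h.symm, fun _ _ h => cx3 h.symm⟩) | (refine ⟨fun h => cx1 h.symm, fun _ h => cx2 h.symm, fun h => cx1 h.symm, fun h => cx2 h.symm⟩)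

theorem pvChain_eq (fs : List String) :
    (if fs.contains "Daily" then "Daily"
     else if fs.contains "Weekly" then "Weekly"
     else if fs.contains "Monthly" then "Monthly"
     else "Quarterly") = pvLabelOf (pvMinRank fs) := by
  obtain ⟨h1, h4, hd, hw, hm⟩ := pvMinRank_key fs
  simp only [List.contains_eq_mem, decide_eq_true_eq]
  unfold pvLabelOf
  by_cases d : "Daily" ∈ fs <;> by_cases w : "Weekly" ∈ fs <;> by_cases m : "Monthly" ∈ fs
  all_goals simp_all

-- ===== VERDICT (by name: the statement is the Claim_ definition above) =====
theorem determine_validation_frequency_py_spec : Claim_equal_determine_validation_frequency_py := by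
  intro vm _
  unfold Spec_determine_validation_frequency_py determine_validation_frequency_py determine_validation_frequency_py_alt
  have : vm.foldl (fun best m => min best (pvRankOf (pvGetFreq m))) 4 = pvMinRank (vm.map pvGetFreq) := by
    simp [pvMinRank, List.foldl_map]
  rw [this]
  exact pvChain_eq (vm.map pvGetFreq)
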